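-- pv_equiv track=rewrite | github.com/mesham/tt-sim | tt_sim/pe/tensix/backends/vector.py | booleanOp
-- ===== SOURCE A (Python) =====
-- def booleanOp(mod1, A_list, B_list):
--     for A, B in zip(A_list, B_list):
--         match mod1:
--             case 1:
--                 yield B
--             case 2:
--                 yield not B
--             case 3:
--                 yield A and B
--             case 4:
--                 yield A or B
--             case 5:
--                 yield A and (not B)
--             case 6:
--                 yield A or (not B)
--             case 7:
--                 yield (not A) and B
--             case 8:
--                 yield (not A) or B
--             case 9:
--                 yield (not A) and (not B)
--             case 10:
--                 yield (not A) or (not B)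
--             case 11:
--                 yield A != B
--             case 12:
--                 yield A == B
-- ===== SOURCE B (Python) =====
-- # Each op 1..12 is a 2-variable boolean function, i.e. a 4-bit truth table;
-- # all 12 tables are packed as nibbles into one integer constant.
-- _TABLE = 0x9671B2D4E85A
--
-- def booleanOp(mod1, A_list, B_list):
--     if not (1 <= mod1 <= 12):
--         return
--     mask = (_TABLE >> (4 * (mod1 - 1))) & 15
--     for A, B in zip(A_list, B_list):
--         yield bool((mask >> (2 * A + B)) & 1)
-- ===== Notes on version B (the rewrite author's own statement) =====
-- stated objective: alternative
-- what changed: B replaces the 12-way boolean-logic match re-evaluated per element with pure arithmetic: each op is a 4-bit truth table packed into one integer constant, the table is selected once by a shift before the loop, and each output is extracted as bool((mask >> (2*A+B)) & 1) in a single zip pass.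
import Mathlib
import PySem

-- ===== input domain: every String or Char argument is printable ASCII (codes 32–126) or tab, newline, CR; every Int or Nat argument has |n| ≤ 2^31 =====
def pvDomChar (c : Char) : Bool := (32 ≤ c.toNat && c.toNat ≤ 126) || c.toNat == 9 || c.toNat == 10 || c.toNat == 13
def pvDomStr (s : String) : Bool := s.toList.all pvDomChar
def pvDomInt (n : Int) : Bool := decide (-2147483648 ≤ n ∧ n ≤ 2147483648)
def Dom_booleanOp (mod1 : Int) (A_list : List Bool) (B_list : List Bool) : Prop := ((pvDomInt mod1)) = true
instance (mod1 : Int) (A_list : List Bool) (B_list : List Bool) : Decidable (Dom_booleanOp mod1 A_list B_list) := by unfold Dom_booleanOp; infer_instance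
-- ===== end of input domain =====

set_option maxHeartbeats 1000000


-- Header: B replaces the 12-way boolean-logic match by arithmetic on packed 4-bit truth
-- tables (one integer constant, one bit extraction per pair); objective: alternative algorithm.

-- ===== PORT A =====
-- One step of A's match on mod1: the (0- or 1-element) list of values yielded for one pair,
-- branches in A's order; the fall-through (no case matches) yields nothing.
def pvStepA (mod1 : Int) (A B : Bool) : List Bool :=
  if mod1 = 1 then [B]
  else if mod1 = 2 then [!B]
  else if mod1 = 3 then [A && B]
  else if mod1 = 4 then [A || B]
  else if mod1 = 5 then [A && !B]
  else if mod1 = 6 then [A || !B]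
  else if mod1 = 7 then [!A && B]
  else if mod1 = 8 then [!A || B]
  else if mod1 = 9 then [!A && !B]
  else if mod1 = 10 then [!A || !B]
  else if mod1 = 11 then [A != B]
  else if mod1 = 12 then [A == B]
  else []

-- A's loop: for A, B in zip(A_list, B_list), emit the step's yields in order.
def booleanOpGo (mod1 : Int) : List (Bool × Bool) → List Bool
  | [] => []
  | (A, B) :: rest => pvStepA mod1 A B ++ booleanOpGo mod1 rest

def booleanOp (mod1 : Int) (A_list : List Bool) (B_list : List Bool) : List Bool :=
  booleanOpGo mod1 (A_list.zip B_list)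

-- ===== PORT B =====
-- 12 four-bit truth tables packed as nibbles into one constant (_TABLE in Source B).
def pvTable : Nat := 0x9671B2D4E85A

def booleanOp_alt (mod1 : Int) (A_list : List Bool) (B_list : List Bool) : List Bool :=
  if 1 ≤ mod1 ∧ mod1 ≤ 12 then
    let mask : Nat := (pvTable >>> (4 * (mod1 - 1)).toNat) &&& 15
    (A_list.zip B_list).map (fun p =>
      ((mask >>> (2 * (cond p.1 1 0) + (cond p.2 1 0))) &&& 1) == 1)
  else []

-- ===== PRECONDITION & SPEC =====
def Spec_booleanOp (mod1 : Int) (A_list : List Bool) (B_list : List Bool) (out : List Bool) : Prop := out = booleanOp_alt mod1 A_list B_list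
instance (mod1 : Int) (A_list : List Bool) (B_list : List Bool) (out : List Bool) : Decidable (Spec_booleanOp mod1 A_list B_list out) := by unfold Spec_booleanOp; infer_instance

-- ===== CLAIM (what is proved, stated in full; the proofs are below) =====
def Claim_equal_booleanOp : Prop := ∀ (mod1 : Int) (A_list : List Bool) (B_list : List Bool), Dom_booleanOp mod1 A_list B_list → Spec_booleanOp mod1 A_list B_list (booleanOp mod1 A_list B_list)

-- ===== LEMMAS AND PROOFS =====
theorem booleanOpGo_flatMap (mod1 : Int) (l : List (Bool × Bool)) :
    booleanOpGo mod1 l = l.flatMap (fun p => pvStepA mod1 p.1 p.2) := by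
  induction l with
  | nil => rfl
  | cons hd tl ih =>
    obtain ⟨A, B⟩ := hd
    rw [List.flatMap_cons, ← ih]
    rfl

theorem flatMap_nil {α β : Type} (l : List α) (f : α → List β)
    (h : ∀ a, f a = []) : l.flatMap f = [] := by
  induction l with
  | nil => rfl
  | cons hd tl ih => simp [List.flatMap_cons, h hd, ih]

theorem flatMap_singleton_eq_map {α β : Type} (l : List α) (f : α → List β) (g : α → β)
    (h : ∀ a, f a = [g a]) : l.flatMap f = l.map g := by
  induction l with
  | nil => rfl
  | cons hd tl ih => simp [List.flatMap_cons, h hd, ih]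

theorem pvStepA_out (mod1 : Int) (h : ¬ (1 ≤ mod1 ∧ mod1 ≤ 12)) (A B : Bool) :
    pvStepA mod1 A B = [] := by
  unfold pvStepA
  split_ifs <;> first | rfl | omega

theorem alt_in_range (mod1 : Int) (h : 1 ≤ mod1 ∧ mod1 ≤ 12)
    (A_list B_list : List Bool)
    (hs : ∀ A B : Bool, pvStepA mod1 A B =
      [((((pvTable >>> (4 * (mod1 - 1)).toNat) &&& 15) >>>
          (2 * (cond A 1 0) + (cond B 1 0))) &&& 1) == 1]) :
    booleanOp mod1 A_list B_list = booleanOp_alt mod1 A_list B_list := by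
  unfold booleanOp booleanOp_alt
  rw [if_pos h, booleanOpGo_flatMap]
  exact flatMap_singleton_eq_map _ _ _ (fun p => hs p.1 p.2)

-- ===== VERDICT (by name: the statement is the Claim_ definition above) =====
theorem booleanOp_spec : Claim_equal_booleanOp := by
  intro mod1 A_list B_list _
  unfold Spec_booleanOp
  by_cases h : 1 ≤ mod1 ∧ mod1 ≤ 12
  · obtain ⟨h1, h2⟩ := h
    interval_cases mod1 <;>
      exact alt_in_range _ (by omega) _ _ (by decide)
  · unfold booleanOp booleanOp_alt
    rw [if_neg h, booleanOpGo_flatMap]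
    exact flatMap_nil _ _ (fun p => pvStepA_out mod1 h p.1 p.2)
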